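-- pv_equiv track=rewrite | github.com/ImBunny77/ai-datacenter-research | dashboard/project_updater.py | extract_companies
-- ===== SOURCE A (Python) =====
-- def extract_companies(text: str) -> list[str]:
--     found = []
--     text_l = text.lower()
--     mapping = {
--         "microsoft": "Microsoft", "azure": "Microsoft",
--         "amazon": "Amazon", "aws": "Amazon",
--         "google": "Google", "alphabet": "Google",
--         "meta": "Meta", "facebook": "Meta",
--         "oracle": "Oracle",
--         "coreweave": "CoreWeave",
--         "xai": "xAI", "grok": "xAI",
--         "nvidia": "NVIDIA",
--         "openai": "OpenAI",
--         "anthropic": "Anthropic",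
--         "softbank": "SoftBank",
--     }
--     for kw, co in mapping.items():
--         if kw in text_l and co not in found:
--             found.append(co)
--     return found
-- ===== SOURCE B (Python) =====
-- # Text-driven single scan: walk the lowercased text once; at each position use a
-- # first-character index to test only the aliases that could start there, collecting
-- # hit companies in a set; finally emit companies in the fixed canonical order.
--
-- _ALIASES = [
--     ("microsoft", "Microsoft"), ("azure", "Microsoft"),
--     ("amazon", "Amazon"), ("aws", "Amazon"),
--     ("google", "Google"), ("alphabet", "Google"),
--     ("meta", "Meta"), ("facebook", "Meta"),
--     ("oracle", "Oracle"),
--     ("coreweave", "CoreWeave"),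
--     ("xai", "xAI"), ("grok", "xAI"),
--     ("nvidia", "NVIDIA"),
--     ("openai", "OpenAI"),
--     ("anthropic", "Anthropic"),
--     ("softbank", "SoftBank"),
-- ]
-- _INDEX = {}
-- for _kw, _co in _ALIASES:
--     _INDEX.setdefault(_kw[0], []).append((_kw, _co))
-- _ORDER = ["Microsoft", "Amazon", "Google", "Meta", "Oracle", "CoreWeave",
--           "xAI", "NVIDIA", "OpenAI", "Anthropic", "SoftBank"]
--
--
-- def extract_companies(text: str) -> list[str]:
--     text_l = text.lower()
--     hits = set()
--     for i, ch in enumerate(text_l):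
--         for kw, co in _INDEX.get(ch, []):
--             if text_l.startswith(kw, i):
--                 hits.add(co)
--     return [co for co in _ORDER if co in hits]
-- ===== Notes on version B (the rewrite author's own statement) =====
-- stated objective: alternative
-- what changed: Replaces A's keyword-driven scan (each alias substring-searched in the text, with a dedup membership guard on the growing result list) by a text-driven single left-to-right scan: at each text position a first-character hash index selects the few aliases that could start there and startswith is tested, hit companies are accumulated in a set, and the output is the fixed canonical order filtered by that set.
import Mathlib
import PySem

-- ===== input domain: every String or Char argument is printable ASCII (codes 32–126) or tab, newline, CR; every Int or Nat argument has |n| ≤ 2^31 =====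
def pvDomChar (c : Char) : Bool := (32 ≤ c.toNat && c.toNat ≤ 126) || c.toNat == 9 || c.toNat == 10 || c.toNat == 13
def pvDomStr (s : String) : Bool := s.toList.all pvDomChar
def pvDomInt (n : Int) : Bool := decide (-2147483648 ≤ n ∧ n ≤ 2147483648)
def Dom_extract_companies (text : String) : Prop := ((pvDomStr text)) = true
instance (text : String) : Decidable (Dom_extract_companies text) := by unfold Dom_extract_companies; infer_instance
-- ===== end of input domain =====

-- B replaces A's keyword-driven substring scan by a text-driven single scan with a
-- first-character index; equivalence is about the return value (no argument is mutated).

-- ===== PORT A =====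
-- mapping.items() of A's dict literal (all keys distinct), in insertion order
def pvMappingA : List (String × String) :=
  [("microsoft", "Microsoft"), ("azure", "Microsoft"),
   ("amazon", "Amazon"), ("aws", "Amazon"),
   ("google", "Google"), ("alphabet", "Google"),
   ("meta", "Meta"), ("facebook", "Meta"),
   ("oracle", "Oracle"),
   ("coreweave", "CoreWeave"),
   ("xai", "xAI"), ("grok", "xAI"),
   ("nvidia", "NVIDIA"),
   ("openai", "OpenAI"),
   ("anthropic", "Anthropic"),
   ("softbank", "SoftBank")]

def extract_companies (text : String) : List String :=
  let text_l := PySem.Str.lower text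
  pvMappingA.foldl
    (fun found kc =>
      if PySem.Str.isIn kc.1 text_l && !(found.contains kc.2) then found ++ [kc.2] else found)
    []

-- ===== PORT B =====
-- Source B's module-level _ALIASES table
def pvAliasesB : List (String × String) :=
  [("microsoft", "Microsoft"), ("azure", "Microsoft"),
   ("amazon", "Amazon"), ("aws", "Amazon"),
   ("google", "Google"), ("alphabet", "Google"),
   ("meta", "Meta"), ("facebook", "Meta"),
   ("oracle", "Oracle"),
   ("coreweave", "CoreWeave"),
   ("xai", "xAI"), ("grok", "xAI"),
   ("nvidia", "NVIDIA"),
   ("openai", "OpenAI"),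
   ("anthropic", "Anthropic"),
   ("softbank", "SoftBank")]

-- Source B's module-level setdefault/append loop building _INDEX; kw[0] is headD ' '
-- (exact: every _ALIASES keyword is a nonempty literal, so the default is never used)
def pvIndexB : PySem.Dict Char (List (String × String)) :=
  pvAliasesB.foldl
    (fun d kc => d.modify (kc.1.toList.headD ' ') [] (fun l => l ++ [kc]))
    PySem.Dict.empty

def pvOrderB : List String :=
  ["Microsoft", "Amazon", "Google", "Meta", "Oracle", "CoreWeave",
   "xAI", "NVIDIA", "OpenAI", "Anthropic", "SoftBank"]

-- text_l.startswith(kw, i) for the nonnegative i produced by enumerate is exactly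
-- kw.toList.isPrefixOf (tl.drop i)
def extract_companies_alt (text : String) : List String :=
  let tl := (PySem.Str.lower text).toList
  let hits : PySem.Set String :=
    (PySem.List.enumerate tl).foldl
      (fun hits ic =>
        (pvIndexB.getD ic.2 []).foldl
          (fun h kc =>
            if kc.1.toList.isPrefixOf (tl.drop ic.1.toNat) then PySem.Set.add h kc.2 else h)
          hits)
      PySem.Set.empty
  pvOrderB.filter (fun co => PySem.Set.contains hits co)

-- ===== PRECONDITION & SPEC =====
def Spec_extract_companies (text : String) (out : List String) : Prop := out = extract_companies_alt text
instance (text : String) (out : List String) : Decidable (Spec_extract_companies text out) := by unfold Spec_extract_companies; infer_instance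

-- ===== CLAIM (what is proved, stated in full; the proofs are below) =====
def Claim_equal_extract_companies : Prop := ∀ (text : String), Dom_extract_companies text → Spec_extract_companies text (extract_companies text)

-- ===== LEMMAS AND PROOFS =====

-- A's loop body, with the text fixed
def pvStepA (t : String) (found : List String) (kc : String × String) : List String :=
  if PySem.Str.isIn kc.1 t && !(found.contains kc.2) then found ++ [kc.2] else found

-- B's groups-by-company view of A's mapping (proof-side helper only)
def pvGroups : List (String × List String) :=
  [("Microsoft", ["microsoft", "azure"]),
   ("Amazon", ["amazon", "aws"]),
   ("Google", ["google", "alphabet"]),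
   ("Meta", ["meta", "facebook"]),
   ("Oracle", ["oracle"]),
   ("CoreWeave", ["coreweave"]),
   ("xAI", ["xai", "grok"]),
   ("NVIDIA", ["nvidia"]),
   ("OpenAI", ["openai"]),
   ("Anthropic", ["anthropic"]),
   ("SoftBank", ["softbank"])]

-- once co is in found, every remaining keyword of its group is skipped
theorem pvFold_group_mem (t co : String) (kws : List String) (found : List String)
    (h : co ∈ found) :
    (kws.map (fun kw => (kw, co))).foldl (pvStepA t) found = found := by
  induction kws with
  | nil => rfl
  | cons kw rest ih =>
      simp only [List.map_cons, List.foldl_cons, pvStepA, List.contains_eq_mem, h,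
        decide_true, Bool.not_true, Bool.and_false, Bool.false_eq_true, if_false]
      exact ih

-- one whole group: appends co exactly once iff some keyword matches
theorem pvFold_group (t co : String) (kws : List String) (found : List String)
    (h : co ∉ found) :
    (kws.map (fun kw => (kw, co))).foldl (pvStepA t) found =
      if kws.any (fun kw => PySem.Str.isIn kw t) then found ++ [co] else found := by
  induction kws with
  | nil => rfl
  | cons kw rest ih =>
      simp only [List.map_cons, List.foldl_cons, List.any_cons]
      by_cases hkw : PySem.Str.isIn kw t = true
      · have hmem : co ∈ found ++ [co] := by simp
        simp only [pvStepA, hkw, List.contains_eq_mem, h, decide_false, Bool.not_false,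
          Bool.and_true, if_true, Bool.true_or, if_true]
        exact pvFold_group_mem t co rest (found ++ [co]) hmem
      · simp only [pvStepA, Bool.eq_false_iff.mpr hkw, Bool.false_and, Bool.false_eq_true,
          if_false, Bool.false_or]
        exact ih

-- the whole fold over a grouped mapping = filter-and-map over the groups
theorem pvFold_groups (t : String) (groups : List (String × List String)) (found : List String)
    (hdis : ∀ g ∈ groups, g.1 ∉ found) (hnd : (groups.map Prod.fst).Nodup) :
    (groups.flatMap (fun g => g.2.map (fun kw => (kw, g.1)))).foldl (pvStepA t) found =
      found ++ (groups.filter (fun g => g.2.any (fun kw => PySem.Str.isIn kw t))).map Prod.fst := by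
  induction groups generalizing found with
  | nil => simp
  | cons g rest ih =>
      simp only [List.flatMap_cons, List.foldl_append]
      have hg : g.1 ∉ found := hdis g (by simp)
      rw [pvFold_group t g.1 g.2 found hg]
      simp only [List.map_cons, List.nodup_cons] at hnd
      by_cases hany : g.2.any (fun kw => PySem.Str.isIn kw t) = true
      · have hdis' : ∀ g' ∈ rest, g'.1 ∉ found ++ [g.1] := by
          intro g' hg'
          simp only [List.mem_append, List.mem_singleton]
          rintro (h1 | h1)
          · exact hdis g' (by simp [hg']) h1
          · exact hnd.1 (h1 ▸ List.mem_map_of_mem hg')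
        rw [if_pos hany, ih (found ++ [g.1]) hdis' hnd.2,
          List.filter_cons_of_pos (by simpa using hany), List.map_cons]
        simp
      · have hdis' : ∀ g' ∈ rest, g'.1 ∉ found := fun g' hg' => hdis g' (by simp [hg'])
        rw [if_neg hany, ih found hdis' hnd.2,
          List.filter_cons_of_neg (by simpa using hany)]

-- A's flat mapping is exactly pvGroups, flattened
theorem pvMapping_eq_flat :
    pvMappingA = pvGroups.flatMap (fun g => g.2.map (fun kw => (kw, g.1))) := by decide


-- ===== B-side lemmas =====
theorem pvMem_inner (pairs : List (String × String)) (p : String × String → Bool)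
    (h : List String) (co : String) :
    co ∈ pairs.foldl (fun h kc => if p kc then PySem.Set.add h kc.2 else h) h ↔
      co ∈ h ∨ ∃ kc, kc ∈ pairs ∧ p kc = true ∧ kc.2 = co := by
  induction pairs generalizing h with
  | nil => simp
  | cons kc rest ih =>
      simp only [List.foldl_cons, ih, List.mem_cons]
      by_cases hp : p kc = true
      · rw [if_pos hp]; simp only [PySem.Set.mem_add]
        constructor
        · rintro ((h1 | h1) | ⟨kc', hkc', hp', hc'⟩)
          · exact Or.inl h1
          · exact Or.inr ⟨kc, Or.inl rfl, hp, h1.symm⟩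
          · exact Or.inr ⟨kc', Or.inr hkc', hp', hc'⟩
        · rintro (h1 | ⟨kc', rfl | hkc', hp', hc'⟩)
          · exact Or.inl (Or.inl h1)
          · exact Or.inl (Or.inr hc'.symm)
          · exact Or.inr ⟨kc', hkc', hp', hc'⟩
      · rw [if_neg hp]
        constructor
        · rintro (h1 | ⟨kc', hkc', hp', hc'⟩)
          · exact Or.inl h1
          · exact Or.inr ⟨kc', Or.inr hkc', hp', hc'⟩
        · rintro (h1 | ⟨kc', rfl | hkc', hp', hc'⟩)
          · exact Or.inl h1
          · exact absurd hp' hp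
          · exact Or.inr ⟨kc', hkc', hp', hc'⟩

theorem pvMem_outer (tl : List Char) (l : List (Int × Char)) (h : List String) (co : String) :
    co ∈ l.foldl
        (fun hits ic =>
          (pvIndexB.getD ic.2 []).foldl
            (fun h kc =>
              if kc.1.toList.isPrefixOf (tl.drop ic.1.toNat) then PySem.Set.add h kc.2 else h)
            hits) h ↔
      co ∈ h ∨ ∃ ic kc, ic ∈ l ∧ kc ∈ pvIndexB.getD ic.2 [] ∧
        kc.1.toList.isPrefixOf (tl.drop ic.1.toNat) = true ∧ kc.2 = co := by
  induction l generalizing h with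
  | nil => simp
  | cons ic rest ih =>
      simp only [List.foldl_cons, ih, pvMem_inner, List.mem_cons]
      constructor
      · rintro ((h1 | ⟨kc, hkc, hp, hc⟩) | ⟨ic', kc', hic', w⟩)
        · exact Or.inl h1
        · exact Or.inr ⟨ic, kc, Or.inl rfl, hkc, hp, hc⟩
        · exact Or.inr ⟨ic', kc', Or.inr hic', w⟩
      · rintro (h1 | ⟨ic', kc', rfl | hic', w⟩)
        · exact Or.inl (Or.inl h1)
        · exact Or.inl (Or.inr ⟨kc', w⟩)
        · exact Or.inr ⟨ic', kc', hic', w⟩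
theorem pvIndex_eval : pvIndexB = PySem.Dict.mk
      [('m', [("microsoft", "Microsoft"), ("meta", "Meta")]),
       ('a', [("azure", "Microsoft"), ("amazon", "Amazon"), ("aws", "Amazon"),
              ("alphabet", "Google"), ("anthropic", "Anthropic")]),
       ('g', [("google", "Google"), ("grok", "xAI")]),
       ('f', [("facebook", "Meta")]),
       ('o', [("oracle", "Oracle"), ("openai", "OpenAI")]),
       ('c', [("coreweave", "CoreWeave")]),
       ('x', [("xai", "xAI")]),
       ('n', [("nvidia", "NVIDIA")]),
       ('s', [("softbank", "SoftBank")])] := by decide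

theorem pvIndex_sound (ch : Char) (kc : String × String) (h : kc ∈ pvIndexB.getD ch []) :
    kc ∈ pvAliasesB ∧ kc.1.toList.head? = some ch := by
  by_cases h1 : ch = 'm'; · subst h1; revert kc h; decide
  by_cases h2 : ch = 'a'; · subst h2; revert kc h; decide
  by_cases h3 : ch = 'g'; · subst h3; revert kc h; decide
  by_cases h4 : ch = 'f'; · subst h4; revert kc h; decide
  by_cases h5 : ch = 'o'; · subst h5; revert kc h; decide
  by_cases h6 : ch = 'c'; · subst h6; revert kc h; decide
  by_cases h7 : ch = 'x'; · subst h7; revert kc h; decide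
  by_cases h8 : ch = 'n'; · subst h8; revert kc h; decide
  by_cases h9 : ch = 's'; · subst h9; revert kc h; decide
  rw [pvIndex_eval] at h
  simp only [PySem.Dict.getD, PySem.Dict.get?_mk_cons, beq_iff_eq,
    Ne.symm h1, Ne.symm h2, Ne.symm h3, Ne.symm h4, Ne.symm h5, Ne.symm h6,
    Ne.symm h7, Ne.symm h8, Ne.symm h9, if_false] at h
  simp [PySem.Dict.get?] at h

theorem pvIndex_complete (kc : String × String) (hkc : kc ∈ pvAliasesB) (ch : Char)
    (hch : kc.1.toList.head? = some ch) : kc ∈ pvIndexB.getD ch [] := by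
  fin_cases hkc <;> (simp only [] at hch; injection hch with hch; subst hch; decide)

theorem pvHits_iff (tl : List Char) (co : String) :
    co ∈ (PySem.List.enumerate tl).foldl
        (fun hits ic =>
          (pvIndexB.getD ic.2 []).foldl
            (fun h kc =>
              if kc.1.toList.isPrefixOf (tl.drop ic.1.toNat) then PySem.Set.add h kc.2 else h)
            hits) PySem.Set.empty ↔
      ∃ kc, kc ∈ pvAliasesB ∧ kc.2 = co ∧ PySem.Chars.isIn kc.1.toList tl = true := by
  rw [pvMem_outer]
  simp only [PySem.Set.empty, List.not_mem_nil, false_or]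
  constructor
  · rintro ⟨ic, kc, hic, hkc, hp, hc⟩
    obtain ⟨ha, -⟩ := pvIndex_sound ic.2 kc hkc
    refine ⟨kc, ha, hc, ?_⟩
    rw [← PySem.Chars.exists_prefix_drop_iff_isIn]
    exact ⟨ic.1.toNat, List.isPrefixOf_iff_prefix.mp hp⟩
  · rintro ⟨kc, hkc, hc, hin⟩
    rw [← PySem.Chars.exists_prefix_drop_iff_isIn] at hin
    obtain ⟨j, hj⟩ := hin
    have hne : kc.1.toList ≠ [] := by fin_cases hkc <;> simp
    have hlt : j < tl.length := by
      by_contra hge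
      rw [List.drop_eq_nil_of_le (by omega)] at hj
      exact hne (List.prefix_nil.mp hj)
    have hch : kc.1.toList.head? = some tl[j] := by
      obtain ⟨t, ht⟩ := hj
      rcases hx : kc.1.toList with _ | ⟨c, cs⟩
      · exact absurd hx hne
      · rw [hx] at ht
        have h2 : (tl.drop j).head? = some tl[j] := by
          rw [List.head?_drop]; simp [hlt]
        rw [← ht] at h2
        simpa using h2
    refine ⟨((j : Int), tl[j]), kc, ?_, pvIndex_complete kc hkc _ hch, ?_, hc⟩
    · rw [PySem.List.mem_enumerate_iff]
      exact ⟨j, hlt, by simp⟩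
    · simpa using hj
theorem pvGroup_alias_iff (tl : List Char) (g : String × List String) (hg : g ∈ pvGroups) :
    (∃ kc, kc ∈ pvAliasesB ∧ kc.2 = g.1 ∧ PySem.Chars.isIn kc.1.toList tl = true) ↔
      g.2.any (fun kw => PySem.Chars.isIn kw.toList tl) = true := by
  fin_cases hg <;> simp [pvAliasesB, List.any_cons]

-- ===== VERDICT (by name: the statement is the Claim_ definition above) =====
theorem extract_companies_spec : Claim_equal_extract_companies := by
  intro text _
  unfold Spec_extract_companies
  simp only [extract_companies, extract_companies_alt]
  show List.foldl (pvStepA (PySem.Str.lower text)) [] pvMappingA = _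
  rw [pvMapping_eq_flat, pvFold_groups _ pvGroups [] (by simp) (by decide)]
  simp only [List.nil_append]
  rw [show pvOrderB = pvGroups.map Prod.fst from by decide, List.filter_map]
  congr 1
  apply List.filter_congr
  intro g hg
  simp only [Function.comp_apply]
  rw [Bool.eq_iff_iff, PySem.Set.contains_iff, pvHits_iff, pvGroup_alias_iff _ g hg]
  simp
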